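-- pv_equiv track=rewrite | github.com/ys10/Grapheme-PhonemeAlignment | one_grapheme_2_one_phoneme.py | introduce_epsilon_phone_seq
-- ===== SOURCE A (Python) =====
-- from itertools import combinations_with_replacement
--
-- def introduce_epsilon_phone_seq(word, phones):
--     """
--
--     :param word:
--     :param phones:
--     :return: a list containing all word-phones pairs with epsilon introduced
--     """
--     length_diff = len(word) - len(phones)
--     location_combines_with_replace = [c for c in combinations_with_replacement(range(len(phones) + 1), length_diff)]
--     pair_list = list()
--     for locations in location_combines_with_replace:
--         temp_phones = phones.copy()
--         for i in range(len(locations)):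
--             temp_phones.insert(locations[i] + i, "*")
--             pass
--         pair_list.append((word, temp_phones))
--         pass
--     return pair_list
-- ===== SOURCE B (Python) =====
-- from itertools import combinations
--
--
-- def introduce_epsilon_phone_seq(word, phones):
--     """Enumerate star ('*') positions directly: choose the length_diff slots of
--     the output (length len(word)) that hold '*', fill the rest with the phones
--     in order.  Same alignments in the same order as the insertion-based version
--     (combinations are the stars-and-bars image t_i -> t_i + i of the
--     nondecreasing insertion locations)."""
--     length_diff = len(word) - len(phones)
--     pair_list = []
--     for stars in combinations(range(len(word)), length_diff):
--         star_set = set(stars)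
--         it = iter(phones)
--         seq = ["*" if pos in star_set else next(it) for pos in range(len(word))]
--         pair_list.append((word, seq))
--     return pair_list
-- ===== Notes on version B (the rewrite author's own statement) =====
-- stated objective: idiomatic
-- what changed: Instead of enumerating nondecreasing insertion-location multisets and performing repeated list.insert shifts on a copy of phones, B enumerates the star slot positions directly with combinations(range(len(word)), length_diff) and builds each output sequence in one left-to-right pass (star slot -> '*', otherwise the next phone).
import Mathlib
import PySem

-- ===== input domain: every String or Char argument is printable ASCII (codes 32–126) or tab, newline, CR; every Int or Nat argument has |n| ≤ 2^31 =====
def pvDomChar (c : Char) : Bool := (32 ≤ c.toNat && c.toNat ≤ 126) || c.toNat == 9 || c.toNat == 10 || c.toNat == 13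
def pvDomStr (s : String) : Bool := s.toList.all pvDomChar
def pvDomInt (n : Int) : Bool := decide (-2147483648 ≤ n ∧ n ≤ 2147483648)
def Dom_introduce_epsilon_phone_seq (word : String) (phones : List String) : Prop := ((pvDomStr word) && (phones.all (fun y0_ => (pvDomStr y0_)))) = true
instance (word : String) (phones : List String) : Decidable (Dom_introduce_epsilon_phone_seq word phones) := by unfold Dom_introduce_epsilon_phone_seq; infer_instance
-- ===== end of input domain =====

-- B enumerates the star slots directly (combinations of output positions) and fills each
-- sequence in one left-to-right pass, instead of A's repeated list.insert into a copy of
-- phones driven by combinations_with_replacement of insertion locations: idiomatic.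

-- ===== PORT A =====
-- itertools.combinations_with_replacement(pool, r) for a list pool, in itertools' order
def pvCwr {α : Type} : List α → Nat → List (List α)
  | _, 0 => [[]]
  | [], _+1 => []
  | x :: xs, r+1 => ((pvCwr (x :: xs) r).map (x :: ·)) ++ pvCwr xs (r+1)
termination_by l r => (r, l.length)

-- the inner 'for i in range(len(locations)): temp_phones.insert(locations[i] + i, "*")' loop
def pvInsLoop : List String → Nat → List Nat → List String
  | temp, _, [] => temp
  | temp, i, loc :: rest => pvInsLoop (PySem.List.insert temp (Int.ofNat (loc + i)) "*") (i + 1) rest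

def introduce_epsilon_phone_seq (word : String) (phones : List String) : List (String × List String) :=
  -- Python: length_diff = len(word) - len(phones); combinations_with_replacement raises
  -- ValueError when it is negative — exactly the inputs Pre_ excludes (Nat subtraction clamps there)
  let lengthDiff := word.toList.length - phones.length
  let locationCombinesWithReplace := pvCwr (List.range (phones.length + 1)) lengthDiff
  locationCombinesWithReplace.foldl
    (fun pairList locations => pairList ++ [(word, pvInsLoop phones 0 locations)]) []

-- ===== PORT B =====
-- itertools.combinations(pool, r) for a list pool, in itertools' order
def pvComb {α : Type} : List α → Nat → List (List α)
  | _, 0 => [[]]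
  | [], _+1 => []
  | x :: xs, r+1 => ((pvComb xs r).map (x :: ·)) ++ pvComb xs (r+1)

-- the comprehension '["*" if pos in star_set else next(it) for pos in range(len(word))]';
-- the phones iterator is the consumed list argument (it is never exhausted on any admitted
-- input, so the [] fallback is unreachable); 'pos in star_set' is membership in stars
def pvFill (stars : List Nat) : List Nat → List String → List String
  | [], _ => []
  | pos :: rest, phones =>
    if stars.contains pos then "*" :: pvFill stars rest phones
    else match phones with
      | [] => []
      | q :: qs => q :: pvFill stars rest qs

def introduce_epsilon_phone_seq_alt (word : String) (phones : List String) : List (String × List String) :=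
  let lengthDiff := word.toList.length - phones.length
  (pvComb (List.range word.toList.length) lengthDiff).foldl
    (fun pairList stars => pairList ++ [(word, pvFill stars (List.range word.toList.length) phones)]) []

-- ===== PRECONDITION & SPEC =====
-- Pre_ excludes exactly the inputs with len(phones) > len(word), on which A raises
-- ValueError (negative r in combinations_with_replacement); B raises ValueError there too.
def Pre_introduce_epsilon_phone_seq (word : String) (phones : List String) : Prop :=
  phones.length ≤ word.toList.length
instance (word : String) (phones : List String) : Decidable (Pre_introduce_epsilon_phone_seq word phones) := by unfold Pre_introduce_epsilon_phone_seq; infer_instance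

def pvWitness_introduce_epsilon_phone_seq : String × List String := ("ab", ["x"])

def Spec_introduce_epsilon_phone_seq (word : String) (phones : List String) (out : List (String × List String)) : Prop := out = introduce_epsilon_phone_seq_alt word phones
instance (word : String) (phones : List String) (out : List (String × List String)) : Decidable (Spec_introduce_epsilon_phone_seq word phones out) := by unfold Spec_introduce_epsilon_phone_seq; infer_instance

-- ===== CLAIM (what is proved, stated in full; the proofs are below) =====
def Claim_equal_introduce_epsilon_phone_seq : Prop := ∀ (word : String) (phones : List String), Dom_introduce_epsilon_phone_seq word phones → Pre_introduce_epsilon_phone_seq word phones → Spec_introduce_epsilon_phone_seq word phones (introduce_epsilon_phone_seq word phones)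

-- ===== LEMMAS AND PROOFS =====

-- common specification of one alignment, by recursion on the relative insertion locations
def pvS : List Nat → List String → List String
  | [], ph => ph
  | t :: ts, ph => ph.take t ++ "*" :: pvS (ts.map (· - t)) (ph.drop t)
termination_by l _ => l.length
decreasing_by simp

-- the stars-and-bars bijection t_i ↦ t_i + i
def pvStars : List Nat → List Nat
  | [] => []
  | t :: ts => t :: (pvStars ts).map (· + 1)

lemma pv_insert_nat (l : List String) (n : Nat) (a : String) :
    PySem.List.insert l (Int.ofNat n) a = l.take n ++ a :: l.drop n := by
  simp only [PySem.List.insert, PySem.List.sliceIndices]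
  norm_num [Int.ofNat_eq_natCast]
  rw [if_neg (show ¬((n : Int) < 0) by omega)]
  rw [show (min (n : Int) (l.length : Int)).toNat = min n l.length by omega]
  by_cases h : n ≤ l.length
  · rw [min_eq_left h]
  · rw [min_eq_right (by omega), List.take_of_length_le (by omega),
      List.drop_of_length_le (by omega), List.take_of_length_le (by omega : l.length ≤ n),
      List.drop_of_length_le (by omega : l.length ≤ n)]

lemma pv_insert_append (p rest : List String) (n : Nat) (a : String) (h : p.length ≤ n) :
    PySem.List.insert (p ++ rest) (Int.ofNat n) a = p ++ PySem.List.insert rest (Int.ofNat (n - p.length)) a := by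
  rw [pv_insert_nat, pv_insert_nat, List.take_append, List.take_of_length_le h,
    List.drop_append, List.drop_of_length_le h]
  simp

lemma pv_foldl_app {α β : Type} (l : List α) (f : α → β) (acc : List β) :
    l.foldl (fun a x => a ++ [f x]) acc = acc ++ l.map f := by
  induction l generalizing acc with
  | nil => simp
  | cons x xs ih => simp [List.foldl, ih]

lemma pv_insLoop_shift (k : Nat) (ts : List Nat) (j : Nat) (acc : List String) :
    pvInsLoop acc (k + j) ts = pvInsLoop acc j (ts.map (· + k)) := by
  induction ts generalizing j acc with
  | nil => rfl
  | cons t ts ih =>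
    show pvInsLoop (PySem.List.insert acc (Int.ofNat (t + (k + j))) "*") (k + j + 1) ts
       = pvInsLoop (PySem.List.insert acc (Int.ofNat (t + k + j)) "*") (j + 1) (ts.map (· + k))
    rw [show t + (k + j) = t + k + j by omega, show k + j + 1 = k + (j + 1) by omega, ih]

lemma pv_prefix : ∀ (N : Nat) (us : List Nat), us.length ≤ N →
    ∀ (p rest : List String), (∀ x ∈ us, p.length ≤ x) →
    pvInsLoop (p ++ rest) 0 us = p ++ pvInsLoop rest 0 (us.map (· - p.length)) := by
  intro N
  induction N with
  | zero =>
    intro us h p rest _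
    have : us = [] := List.eq_nil_of_length_eq_zero (by omega)
    subst this; rfl
  | succ N ih =>
    intro us h p rest hb
    match us with
    | [] => rfl
    | u :: us' =>
      have hu : p.length ≤ u + 0 := by have := hb u (by simp); omega
      show pvInsLoop (PySem.List.insert (p ++ rest) (Int.ofNat (u + 0)) "*") (0 + 1) us' = _
      rw [pv_insert_append p rest (u + 0) "*" hu,
        show (0 + 1 : Nat) = 1 + 0 from rfl, pv_insLoop_shift 1 us' 0]
      rw [ih (us'.map (· + 1)) (by simpa using h) p _
        (by intro x hx; simp only [List.mem_map] at hx; obtain ⟨y, hy, rfl⟩ := hx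
            have := hb y (by simp [hy]); omega)]
      show _ = p ++ pvInsLoop (PySem.List.insert rest (Int.ofNat ((u - p.length) + 0)) "*") (0 + 1) (us'.map (· - p.length))
      rw [show (0 + 1 : Nat) = 1 + 0 from rfl, pv_insLoop_shift 1 (us'.map (· - p.length)) 0]
      have hmap : (us'.map (· + 1)).map (· - p.length) = (us'.map (· - p.length)).map (· + 1) := by
        rw [List.map_map, List.map_map]
        apply List.map_congr_left
        intro x hx
        have := hb x (by simp [hx])
        simp only [Function.comp_apply]; omega
      rw [hmap, show u + 0 - p.length = u - p.length + 0 from by omega]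

lemma pv_insLoop_S : ∀ (N : Nat) (ts : List Nat), ts.length ≤ N →
    ∀ (phones : List String), List.Pairwise (· ≤ ·) ts → (∀ x ∈ ts, x ≤ phones.length) →
    pvInsLoop phones 0 ts = pvS ts phones := by
  intro N
  induction N with
  | zero =>
    intro ts h phones _ _
    have : ts = [] := List.eq_nil_of_length_eq_zero (by omega)
    subst this; simp [pvInsLoop, pvS]
  | succ N ih =>
    intro ts h phones hs hb
    match ts with
    | [] => simp [pvInsLoop, pvS]
    | t :: ts' =>
      have ht : t ≤ phones.length := hb t (by simp)
      have hts' : ∀ y ∈ ts', t ≤ y := (List.pairwise_cons.mp hs).1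
      show pvInsLoop (PySem.List.insert phones (Int.ofNat (t + 0)) "*") (0 + 1) ts' = _
      rw [pv_insert_nat,
        show (0 + 1 : Nat) = 1 + 0 from rfl, pv_insLoop_shift 1 ts' 0,
        show phones.take (t + 0) ++ "*" :: phones.drop (t + 0)
           = (phones.take t ++ ["*"]) ++ phones.drop t by simp]
      have hplen : (phones.take t ++ ["*"]).length = t + 1 := by
        simp [List.length_take, min_eq_left ht]
      rw [pv_prefix N (ts'.map (· + 1)) (by simpa using h) _ _
        (by intro x hx; simp only [List.mem_map] at hx; obtain ⟨y, hy, rfl⟩ := hx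
            have := hts' y hy; omega)]
      rw [hplen, List.map_map,
        show (ts'.map ((· - (t + 1)) ∘ (· + 1))) = ts'.map (· - t) from
          List.map_congr_left (by intro x _; simp only [Function.comp_apply]; omega)]
      rw [ih (ts'.map (· - t)) (by simpa using h) (phones.drop t)
        ((List.pairwise_cons.mp hs).2.map _ (by intro a b hab; omega))
        (by intro x hx; simp only [List.mem_map] at hx; obtain ⟨y, hy, rfl⟩ := hx
            have := hb y (by simp [hy]); simp [List.length_drop]; omega)]
      show _ = pvS (t :: ts') phones
      rw [pvS]
      simp

lemma pv_stars_lb (t : Nat) : ∀ (ts : List Nat), (∀ x ∈ ts, t ≤ x) →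
    ∀ y ∈ pvStars ts, t ≤ y := by
  intro ts
  induction ts with
  | nil => simp [pvStars]
  | cons u us ih =>
    intro h y hy
    simp only [pvStars, List.mem_cons, List.mem_map] at hy
    rcases hy with rfl | ⟨z, hz, rfl⟩
    · exact h _ (by simp)
    · have := ih (fun x hx => h x (by simp [hx])) z hz; omega

lemma pv_stars_sub (t : Nat) : ∀ (ts : List Nat), (∀ x ∈ ts, t ≤ x) →
    pvStars (ts.map (· - t)) = (pvStars ts).map (· - t) := by
  intro ts
  induction ts with
  | nil => simp [pvStars]
  | cons u us ih =>
    intro h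
    simp only [List.map_cons, pvStars, ih (fun x hx => h x (by simp [hx])), List.map_map]
    congr 1
    apply List.map_congr_left
    intro x hx
    have := pv_stars_lb t us (fun x hx => h x (by simp [hx])) x hx
    simp only [Function.comp_apply]; omega

lemma pv_stars_add (k : Nat) : ∀ (ts : List Nat),
    pvStars (ts.map (· + k)) = (pvStars ts).map (· + k) := by
  intro ts
  induction ts with
  | nil => simp [pvStars]
  | cons u us ih =>
    simp only [List.map_cons, pvStars, ih, List.map_map]
    congr 1
    apply List.map_congr_left
    intro x _
    simp only [Function.comp_apply]; omega

lemma pv_fill_nil (ss : List Nat) : ∀ (poss : List Nat) (ph : List String),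
    (∀ q ∈ poss, ss.contains q = false) → poss.length ≤ ph.length →
    pvFill ss poss ph = ph.take poss.length := by
  intro poss
  induction poss with
  | nil => intro ph _ _; simp [pvFill]
  | cons q poss ih =>
    intro ph h hlen
    match ph with
    | [] => simp at hlen
    | x :: xs =>
      simp only [pvFill, h q (by simp)]
      simp only [Bool.false_eq_true, if_false, List.length_cons, List.take_succ_cons]
      exact congrArg (x :: ·) (ih xs (fun q hq => h q (by simp [hq])) (by simpa using hlen))

lemma pv_fill_skip (ss : List Nat) : ∀ (poss : List Nat) (rest : List Nat) (ph : List String),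
    (∀ q ∈ poss, ss.contains q = false) → poss.length ≤ ph.length →
    pvFill ss (poss ++ rest) ph = ph.take poss.length ++ pvFill ss rest (ph.drop poss.length) := by
  intro poss
  induction poss with
  | nil => intro rest ph _ _; simp
  | cons q poss ih =>
    intro rest ph h hlen
    match ph with
    | [] => simp at hlen
    | x :: xs =>
      simp only [List.cons_append, pvFill, h q (by simp), Bool.false_eq_true, if_false,
        List.length_cons, List.take_succ_cons, List.drop_succ_cons]
      exact congrArg (x :: ·) (ih rest xs (fun q hq => h q (by simp [hq])) (by simpa using hlen))

lemma pv_fill_head_irrel (s : Nat) (ss : List Nat) : ∀ (poss : List Nat) (ph : List String),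
    s ∉ poss → pvFill (s :: ss) poss ph = pvFill ss poss ph := by
  intro poss
  induction poss with
  | nil => intro ph _; rfl
  | cons q poss ih =>
    intro ph h
    have hq : (q == s) = false := by
      simp only [beq_eq_false_iff_ne]; rintro rfl; exact h (by simp)
    simp only [pvFill, List.contains_cons, hq, Bool.false_or]
    cases hc : ss.contains q
    · simp only [Bool.false_eq_true, if_false]
      match ph with
      | [] => rfl
      | x :: xs => exact congrArg (x :: ·) (ih xs (fun hm => h (by simp [hm])))
    · simp only [if_true]
      exact congrArg _ (ih ph (fun hm => h (by simp [hm])))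

lemma pv_fill_S : ∀ (N : Nat) (ts : List Nat), ts.length ≤ N →
    ∀ (a : Nat) (phones : List String), List.Pairwise (· ≤ ·) ts → (∀ x ∈ ts, x ≤ phones.length) →
    pvFill ((pvStars ts).map (· + a)) (List.range' a (ts.length + phones.length)) phones
      = pvS ts phones := by
  intro N
  induction N with
  | zero =>
    intro ts h a phones _ _
    have : ts = [] := List.eq_nil_of_length_eq_zero (by omega)
    subst this
    rw [show pvStars [] = [] from rfl, List.map_nil,
      pv_fill_nil [] _ _ (by intro q _; rfl) (by simp)]
    simp [pvS]
  | succ N ih =>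
    intro ts h a phones hs hb
    match ts with
    | [] =>
      rw [show pvStars [] = [] from rfl, List.map_nil,
        pv_fill_nil [] _ _ (by intro q _; rfl) (by simp)]
      simp [pvS]
    | t :: ts' =>
      have ht : t ≤ phones.length := hb t (by simp)
      have hts' : ∀ y ∈ ts', t ≤ y := (List.pairwise_cons.mp hs).1
      have hlbS : ∀ y ∈ pvStars ts', t ≤ y := pv_stars_lb t ts' hts'
      have hstars : (pvStars (t :: ts')).map (· + a)
          = (a + t) :: (pvStars ts').map (· + (a + 1)) := by
        rw [show pvStars (t :: ts') = t :: (pvStars ts').map (· + 1) from rfl]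
        rw [List.map_cons, List.map_map]
        exact congrArg₂ (· :: ·) (by omega)
          (List.map_congr_left (by intro x _; simp only [Function.comp_apply]; omega))
      rw [hstars]
      have hsplit : (t :: ts').length + phones.length
          = t + (1 + (ts'.length + (phones.length - t))) := by simp; omega
      rw [hsplit, ← List.range'_append]
      have hcont : ∀ q ∈ List.range' a t,
          ((a + t) :: (pvStars ts').map (· + (a + 1))).contains q = false := by
        intro q hq
        rw [List.mem_range'] at hq
        obtain ⟨i, hi, rfl⟩ := hq
        rw [← Bool.not_eq_true, List.contains_iff_mem]
        intro hmem
        rcases List.mem_cons.mp hmem with heq | hmem'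
        · omega
        · rw [List.mem_map] at hmem'
          obtain ⟨y, hy, heq⟩ := hmem'
          have := hlbS y hy; omega
      rw [pv_fill_skip _ _ _ _ hcont (by simp; omega)]
      rw [List.length_range']
      rw [show (1 : Nat) * t = t from by omega]
      rw [Nat.add_comm 1 (ts'.length + (phones.length - t)), List.range'_succ]
      rw [show pvFill ((a + t) :: (pvStars ts').map (· + (a + 1)))
            ((a + t) :: List.range' (a + t + 1) (ts'.length + (phones.length - t))) (phones.drop t)
          = "*" :: pvFill ((a + t) :: (pvStars ts').map (· + (a + 1)))
            (List.range' (a + t + 1) (ts'.length + (phones.length - t))) (phones.drop t) from by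
        rw [pvFill.eq_def]; simp]
      rw [pv_fill_head_irrel _ _ _ _ (by
        intro hmem; rw [List.mem_range'] at hmem; obtain ⟨i, hi, heq⟩ := hmem; omega)]
      have hmapeq : (pvStars ts').map (· + (a + 1))
          = (pvStars (ts'.map (· - t))).map (· + (a + t + 1)) := by
        rw [pv_stars_sub t ts' hts', List.map_map]
        apply List.map_congr_left
        intro x hx
        have := hlbS x hx
        simp only [Function.comp_apply]; omega
      rw [hmapeq]
      have hlen2 : ts'.length + (phones.length - t)
          = (ts'.map (· - t)).length + (phones.drop t).length := by simp
      rw [hlen2]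
      rw [ih (ts'.map (· - t)) (by simpa using h) (a + t + 1) (phones.drop t)
        ((List.pairwise_cons.mp hs).2.map _ (by intro x y hxy; omega))
        (by intro x hx; rw [List.mem_map] at hx; obtain ⟨y, hy, rfl⟩ := hx
            have := hb y (by simp [hy]); simp; omega)]
      rw [pvS]

lemma pv_comb_nil {α : Type} : ∀ (l : List α) (r : Nat), l.length < r → pvComb l r = [] := by
  intro l
  induction l with
  | nil => intro r hr; match r, hr with | r+1, _ => rfl
  | cons x xs ih =>
    intro r hr
    match r, hr with
    | r+1, hr =>
      simp only [pvComb]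
      rw [ih r (by simpa using hr), ih (r+1) (by simp at hr ⊢; omega)]
      simp

lemma pv_cwr_map {α β : Type} (f : α → β) : ∀ (l : List α) (r : Nat),
    pvCwr (l.map f) r = (pvCwr l r).map (List.map f) := by
  intro l r
  fun_induction pvCwr l r with
  | case1 => simp [pvCwr]
  | case2 => simp [pvCwr]
  | case3 x xs r ih1 ih2 =>
    simp only [List.map_cons, pvCwr]
    rw [show f x :: List.map f xs = List.map f (x :: xs) from rfl, ih1, ih2]
    simp [List.map_map, Function.comp_def]

lemma pv_cwr_len {α : Type} : ∀ (l : List α) (r : Nat) (lo : List α),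
    lo ∈ pvCwr l r → lo.length = r := by
  intro l r
  fun_induction pvCwr l r with
  | case1 => simp
  | case2 => simp
  | case3 x xs r ih1 ih2 =>
    intro lo hlo
    rw [List.mem_append] at hlo
    rcases hlo with hlo | hlo
    · rw [List.mem_map] at hlo
      obtain ⟨l', hl', rfl⟩ := hlo
      simp [ih1 l' hl']
    · exact ih2 lo hlo

lemma pv_cwr_sorted_mem : ∀ (l : List Nat) (r : Nat), List.Pairwise (· ≤ ·) l →
    ∀ lo ∈ pvCwr l r, List.Pairwise (· ≤ ·) lo ∧ ∀ x ∈ lo, x ∈ l := by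
  intro l r
  fun_induction pvCwr l r with
  | case1 => simp
  | case2 => simp
  | case3 x xs r ih1 ih2 =>
    intro hs lo hlo
    rw [List.mem_append] at hlo
    rcases hlo with hlo | hlo
    · rw [List.mem_map] at hlo
      obtain ⟨l', hl', rfl⟩ := hlo
      obtain ⟨hl's, hl'm⟩ := ih1 hs l' hl'
      constructor
      · rw [List.pairwise_cons]
        refine ⟨?_, hl's⟩
        intro a ha
        rcases List.mem_cons.mp (hl'm a ha) with rfl | hmem
        · exact le_refl a
        · exact (List.pairwise_cons.mp hs).1 a hmem
      · intro y hy
        rcases List.mem_cons.mp hy with rfl | hy'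
        · simp
        · simp [hl'm y hy']
    · obtain ⟨h1, h2⟩ := ih2 (List.pairwise_cons.mp hs).2 lo hlo
      exact ⟨h1, fun y hy => by simp [h2 y hy]⟩

lemma pv_range'_shift (a k : Nat) : List.range' (a + 1) k = (List.range' a k).map (· + 1) := by
  rw [List.range'_eq_map_range, List.range'_eq_map_range, List.map_map]
  apply List.map_congr_left
  intro x _
  simp only [Function.comp_apply]; omega

lemma pv_comb_cwr : ∀ (d m a : Nat),
    pvComb (List.range' a (m + d)) d = (pvCwr (List.range' a (m + 1)) d).map pvStars := by
  intro d
  induction d with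
  | zero => intro m a; simp [pvComb, pvCwr, pvStars]
  | succ δ ihd =>
    intro m
    induction m with
    | zero =>
      intro a
      rw [show (0 + (δ + 1)) = δ + 1 from by omega, List.range'_succ, pvComb]
      rw [show (0 + 1 : Nat) = 1 from rfl, List.range'_one, pvCwr]
      rw [pv_comb_nil _ (δ + 1) (by simp), List.append_nil]
      rw [show pvCwr ([] : List Nat) (δ + 1) = [] from by rw [pvCwr], List.append_nil]
      rw [show List.range' (a + 1) δ = List.range' (a + 1) (0 + δ) from by rw [Nat.zero_add],
        ihd 0 (a + 1)]
      rw [show List.range' (a + 1) (0 + 1) = [a + 1] from by rw [Nat.zero_add, List.range'_one]]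
      rw [show [a + 1] = ([a].map (· + 1)) from rfl, pv_cwr_map]
      rw [List.map_map, List.map_map, List.map_map]
      apply List.map_congr_left
      intro l _
      simp only [Function.comp_apply]
      rw [pv_stars_add 1 l]
      rfl
    | succ m ihm =>
      intro a
      rw [show (m + 1 + (δ + 1)) = (m + 1 + δ) + 1 from by omega, List.range'_succ, pvComb]
      rw [show (m + 1 + 1) = (m + 1) + 1 from rfl, List.range'_succ (s := a) (n := m + 1), pvCwr]
      rw [← List.range'_succ (s := a) (n := m + 1)]
      rw [List.map_append]
      congr 1
      · rw [show (m + 1 + δ) = (m + 1) + δ from rfl, ihd (m + 1) (a + 1)]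
        rw [show (m + 1 + 1) = (m + 2) from rfl]
        rw [pv_range'_shift a (m + 2), pv_cwr_map]
        rw [List.map_map, List.map_map, List.map_map]
        apply List.map_congr_left
        intro l _
        simp only [Function.comp_apply]
        rw [pv_stars_add 1 l]
        rfl
      · rw [show (m + 1 + δ) = m + (δ + 1) from by omega]
        exact ihm (a + 1)

-- ===== VERDICT (by name: the statement is the Claim_ definition above) =====
theorem introduce_epsilon_phone_seq_spec : Claim_equal_introduce_epsilon_phone_seq := by
  intro word phones _ hpre
  unfold Pre_introduce_epsilon_phone_seq at hpre
  unfold Spec_introduce_epsilon_phone_seq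
  unfold introduce_epsilon_phone_seq introduce_epsilon_phone_seq_alt
  obtain ⟨d, hd⟩ : ∃ d, word.toList.length = phones.length + d :=
    ⟨word.toList.length - phones.length, by omega⟩
  simp only []
  rw [pv_foldl_app, pv_foldl_app, hd,
    show phones.length + d - phones.length = d from by omega]
  rw [List.range_eq_range', List.range_eq_range', pv_comb_cwr d phones.length 0, List.map_map]
  apply List.map_congr_left
  intro ts hts
  have hlen : ts.length = d := pv_cwr_len _ _ ts hts
  have hsorted : List.Pairwise (· ≤ ·) (List.range' 0 (phones.length + 1)) :=
    (List.pairwise_lt_range' 1).imp (fun h => le_of_lt h)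
  obtain ⟨hts_sorted, hts_mem⟩ := pv_cwr_sorted_mem _ _ hsorted ts hts
  have hts_bound : ∀ x ∈ ts, x ≤ phones.length := by
    intro x hx
    have := hts_mem x hx
    rw [List.mem_range'] at this
    obtain ⟨i, hi, rfl⟩ := this; omega
  simp only [Function.comp_apply]
  congr 1
  rw [pv_insLoop_S ts.length ts le_rfl phones hts_sorted hts_bound]
  have hmap0 : (pvStars ts).map (· + 0) = pvStars ts := by simp
  have := pv_fill_S ts.length ts le_rfl 0 phones hts_sorted hts_bound
  rw [hmap0] at this
  rw [← this, hlen, Nat.add_comm d phones.length]
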